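-- pv_equiv track=rewrite | github.com/bebetterest/data | 0verifier/chemistry_qa.py | verify_chemistry_qa
-- ===== SOURCE A (Python) =====
-- def verify_chemistry_qa(
--         answer, ground_truth, question=None
-- ) -> bool:
--     answer = answer.replace(" ", "").strip()
--     ground_truth = ground_truth.replace(" ", "").strip()
--
--     if "->" in ground_truth: # allow different order of elements in each side
--         assert ground_truth.count("->") == 1, (ground_truth, question)
--         if answer.count("->") != 1 or not "->" in answer:
--             return False
--         answer_left, answer_right = answer.split("->")
--         ground_truth_left, ground_truth_right = ground_truth.split("->")
--
--         # check left
--         answer_left_list = [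
--             x.strip() for x in answer_left.split("+")
--         ]
--         ground_truth_left_list = [
--             x.strip() for x in ground_truth_left.split("+")
--         ]
--         left_wrong = False
--         for tmp in ground_truth_left_list:
--             if tmp in answer_left_list:
--                 answer_left_list.remove(tmp)
--             else:
--                 left_wrong = True
--                 break
--         if left_wrong == False and len(answer_left_list) != 0:
--             left_wrong = True
--         if left_wrong:
--             return False
--
--         # check right
--         answer_right_list = [
--             x.strip() for x in answer_right.split("+")
--         ]
--         ground_truth_right_list = [
--             x.strip() for x in ground_truth_right.split("+")
--         ]
--         right_wrong = False
--         for tmp in ground_truth_right_list: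
--             if tmp in answer_right_list:
--                 answer_right_list.remove(tmp)
--             else:
--                 right_wrong = True
--                 break
--         if right_wrong == False and len(answer_right_list) != 0:
--             right_wrong = True
--         if right_wrong:
--             return False
--
--         return True
--     else: # just match
--         ground_truth = ground_truth.replace(" ", "").strip()
--         answer = answer.replace(" ", "").strip()
--         return ground_truth == answer
-- ===== SOURCE B (Python) =====
-- def verify_chemistry_qa(
--         answer, ground_truth, question=None
-- ) -> bool:
--     answer = answer.replace(" ", "").strip()
--     ground_truth = ground_truth.replace(" ", "").strip()
--
--     if "->" in ground_truth:  # allow different order of elements in each side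
--         assert ground_truth.count("->") == 1, (ground_truth, question)
--         if answer.count("->") != 1 or not "->" in answer:
--             return False
--         answer_left, answer_right = answer.split("->")
--         ground_truth_left, ground_truth_right = ground_truth.split("->")
--         # multiset comparison of each side by sorting, instead of the
--         # scan-and-remove loop
--         def side(s):
--             return sorted(x.strip() for x in s.split("+"))
--         return (side(answer_left) == side(ground_truth_left)
--                 and side(answer_right) == side(ground_truth_right))
--     else:  # just match
--         return ground_truth == answer
-- ===== Notes on version B (the rewrite author's own statement) =====
-- stated objective: simpler
-- what changed: Each side of the equation is compared as a multiset by sorting the two term lists once and comparing them, instead of A's flag-driven scan that repeatedly searches and removes from the answer list and then checks the leftover length; the redundant re-clean in the no-arrow branch is dropped.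
import Mathlib
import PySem

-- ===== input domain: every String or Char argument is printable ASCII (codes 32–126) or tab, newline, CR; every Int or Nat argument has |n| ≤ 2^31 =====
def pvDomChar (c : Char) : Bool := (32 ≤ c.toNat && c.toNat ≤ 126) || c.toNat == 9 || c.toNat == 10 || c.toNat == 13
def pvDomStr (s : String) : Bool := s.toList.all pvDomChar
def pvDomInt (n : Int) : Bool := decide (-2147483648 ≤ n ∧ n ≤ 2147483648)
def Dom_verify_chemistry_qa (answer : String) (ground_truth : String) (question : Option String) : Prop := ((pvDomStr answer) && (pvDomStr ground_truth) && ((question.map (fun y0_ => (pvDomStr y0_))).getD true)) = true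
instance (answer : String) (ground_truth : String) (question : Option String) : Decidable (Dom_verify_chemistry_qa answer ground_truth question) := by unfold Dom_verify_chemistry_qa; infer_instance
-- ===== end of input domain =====

-- B replaces A's scan-and-remove multiset check of each equation side by sort-and-compare,
-- and drops the redundant re-cleaning in the no-arrow branch (objective: simpler).


-- ===== PORT A =====
-- s.split(sep) for a nonempty sep (exact: PySem.Chars.splitOn is the sep ≠ "" form)
def pvStrSplit (s sep : String) : List String :=
  (PySem.Chars.splitOn s.toList sep.toList).map String.mk

-- A's 'for tmp in ground_truth_list: if tmp in answer_list: answer_list.remove(tmp) else: wrong = True; break'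
-- ('tmp in list' + '.remove' together are exactly PySem.List.remove?: none = not present)
def pvRemoveLoop (gts : List String) (acc : List String) : List String × Bool :=
  match gts with
  | [] => (acc, false)
  | t :: ts =>
    match PySem.List.remove? acc t with
    | some acc' => pvRemoveLoop ts acc'
    | none => (acc, true)

def verify_chemistry_qa (answer : String) (ground_truth : String) (question : Option String) : Bool :=
  let answer := PySem.Str.strip (PySem.Str.replace answer " " "")
  let ground_truth := PySem.Str.strip (PySem.Str.replace ground_truth " " "")
  if PySem.Str.isIn "->" ground_truth then
    -- 'assert ground_truth.count("->") == 1': the AssertionError inputs are outside Pre_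
    if (PySem.Str.count answer "->" != 1) || !(PySem.Str.isIn "->" answer) then false
    else
      match pvStrSplit answer "->", pvStrSplit ground_truth "->" with
      | [answer_left, answer_right], [ground_truth_left, ground_truth_right] =>
        -- check left
        let answer_left_list := (pvStrSplit answer_left "+").map PySem.Str.strip
        let ground_truth_left_list := (pvStrSplit ground_truth_left "+").map PySem.Str.strip
        let res := pvRemoveLoop ground_truth_left_list answer_left_list
        let left_wrong := if !res.2 && (res.1.length != 0) then true else res.2
        if left_wrong then false
        else
          -- check right
          let answer_right_list := (pvStrSplit answer_right "+").map PySem.Str.strip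
          let ground_truth_right_list := (pvStrSplit ground_truth_right "+").map PySem.Str.strip
          let res2 := pvRemoveLoop ground_truth_right_list answer_right_list
          let right_wrong := if !res2.2 && (res2.1.length != 0) then true else res2.2
          if right_wrong then false else true
      | _, _ => false    -- unreachable: both counts of "->" are 1 here
  else
    let ground_truth := PySem.Str.strip (PySem.Str.replace ground_truth " " "")
    let answer := PySem.Str.strip (PySem.Str.replace answer " " "")
    decide (ground_truth = answer)

-- ===== PORT B =====
-- s.split(sep) for a nonempty sep (B's own copy; exact: PySem.Chars.splitOn is the sep ≠ "" form)
def pvStrSplitB (s sep : String) : List String :=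
  (PySem.Chars.splitOn s.toList sep.toList).map String.mk

-- 'l, r = xs' two-element unpacking (none = ValueError; unreachable under the count guard)
def pvUnpack2 (l : List String) : Option (String × String) :=
  if h : l.length = 2 then some (l[0]'(by omega), l[1]'(by omega)) else none

-- B's side(s) = sorted(x.strip() for x in s.split("+"))
def pvSide (s : String) : List String :=
  PySem.List.sorted ((pvStrSplitB s "+").map PySem.Str.strip) (fun x => x) false

def verify_chemistry_qa_alt (answer : String) (ground_truth : String) (question : Option String) : Bool :=
  let answer := PySem.Str.strip (PySem.Str.replace answer " " "")
  let ground_truth := PySem.Str.strip (PySem.Str.replace ground_truth " " "")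
  if PySem.Str.isIn "->" ground_truth then
    -- 'assert ground_truth.count("->") == 1': the AssertionError inputs are outside Pre_
    if (PySem.Str.count answer "->" != 1) || !(PySem.Str.isIn "->" answer) then false
    else
      match pvUnpack2 (pvStrSplitB answer "->"), pvUnpack2 (pvStrSplitB ground_truth "->") with
      | some (answer_left, answer_right), some (ground_truth_left, ground_truth_right) =>
        decide (pvSide answer_left = pvSide ground_truth_left) &&
        decide (pvSide answer_right = pvSide ground_truth_right)
      | _, _ => false    -- unreachable: both counts of "->" are 1 here
  else
    decide (ground_truth = answer)

-- ===== PRECONDITION & SPEC =====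
-- Pre_ excludes exactly the inputs on which A's assert fires ("->" occurs at least twice in the
-- cleaned ground_truth: AssertionError); B raises there as well.
def Pre_verify_chemistry_qa (answer : String) (ground_truth : String) (question : Option String) : Prop :=
  PySem.Str.count (PySem.Str.strip (PySem.Str.replace ground_truth " " "")) "->" ≤ 1
instance (answer : String) (ground_truth : String) (question : Option String) : Decidable (Pre_verify_chemistry_qa answer ground_truth question) := by unfold Pre_verify_chemistry_qa; infer_instance
def pvWitness_verify_chemistry_qa : String × String × Option String := ("2 H2 + O2 -> 2 H2O", "O2 + 2H2 -> 2H2O", none)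

def Spec_verify_chemistry_qa (answer : String) (ground_truth : String) (question : Option String) (out : Bool) : Prop := out = verify_chemistry_qa_alt answer ground_truth question
instance (answer : String) (ground_truth : String) (question : Option String) (out : Bool) : Decidable (Spec_verify_chemistry_qa answer ground_truth question out) := by unfold Spec_verify_chemistry_qa; infer_instance

-- ===== CLAIM (what is proved, stated in full; the proofs are below) =====
def Claim_equal_verify_chemistry_qa : Prop := ∀ (answer : String) (ground_truth : String) (question : Option String), Dom_verify_chemistry_qa answer ground_truth question → Pre_verify_chemistry_qa answer ground_truth question → Spec_verify_chemistry_qa answer ground_truth question (verify_chemistry_qa answer ground_truth question)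

-- ===== LEMMAS AND PROOFS =====

-- replace(s, " ", "") is the filter that drops spaces
theorem pvReplaceGo_filter (fuel : Nat) (l acc : List Char) (h : l.length ≤ fuel) :
    PySem.Chars.replace.go [' '] [] fuel l acc = acc.reverse ++ l.filter (fun c => c != ' ') := by
  induction fuel generalizing l acc with
  | zero =>
    have : l = [] := List.length_eq_zero_iff.mp (Nat.le_zero.mp h)
    subst this; simp [PySem.Chars.replace.go]
  | succ n ih =>
    cases l with
    | nil => simp [PySem.Chars.replace.go]
    | cons c t =>
      simp only [PySem.Chars.replace.go]
      by_cases hc : c = ' '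
      · subst hc
        rw [if_pos (by simp [List.isPrefixOf])]
        simp only [List.length_cons] at h
        simp only [List.length_cons, List.length_nil, List.drop_succ_cons, List.drop_zero,
          List.reverse_nil, List.nil_append]
        rw [ih t acc (by omega)]
        simp
      · rw [if_neg (by simp [List.isPrefixOf, Ne.symm hc])]
        simp only [List.length_cons] at h
        rw [ih t (c :: acc) (by omega)]
        simp [hc]

theorem pvReplace_space (l : List Char) :
    PySem.Chars.replace l [' '] [] = l.filter (fun c => c != ' ') := by
  simp only [PySem.Chars.replace]
  rw [if_neg (by simp)]
  exact pvReplaceGo_filter l.length l [] (le_refl _)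

theorem pvRstrip_prefix (l : List Char) : PySem.Chars.rstrip l <+: l := by
  have h : List.dropWhile PySem.Chars.isspace l.reverse <:+ l.reverse :=
    List.dropWhile_suffix _
  have h2 := List.reverse_prefix.mpr h
  rw [List.reverse_reverse] at h2
  exact h2

theorem pvMem_strip {c : Char} {l : List Char} (h : c ∈ PySem.Chars.strip l) : c ∈ l := by
  have h1 : c ∈ PySem.Chars.lstrip l := (pvRstrip_prefix _).sublist.mem h
  exact (List.dropWhile_suffix _).sublist.mem h1

theorem pvLstrip_of_rstrip_lstrip (l : List Char) :
    PySem.Chars.lstrip (PySem.Chars.rstrip (PySem.Chars.lstrip l)) =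
      PySem.Chars.rstrip (PySem.Chars.lstrip l) := by
  rcases hy : PySem.Chars.rstrip (PySem.Chars.lstrip l) with _ | ⟨a, s⟩
  · simp [PySem.Chars.lstrip]
  · have hpre := pvRstrip_prefix (PySem.Chars.lstrip l)
    rw [hy] at hpre
    rcases hpre with ⟨t, ht⟩
    have hdw : List.dropWhile PySem.Chars.isspace l = a :: (s ++ t) := by
      have h' : (a :: s) ++ t = PySem.Chars.lstrip l := ht
      simpa [PySem.Chars.lstrip] using h'.symm
    have hne : List.dropWhile PySem.Chars.isspace l ≠ [] := by simp [hdw]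
    have hfalse : PySem.Chars.isspace a = false := by
      have h3 := List.head_dropWhile_not PySem.Chars.isspace hne
      simp only [hdw, List.head_cons] at h3
      exact h3
    show List.dropWhile PySem.Chars.isspace (a :: s) = a :: s
    rw [List.dropWhile_cons_of_neg (by simp [hfalse])]

theorem pvRstrip_idem (l : List Char) :
    PySem.Chars.rstrip (PySem.Chars.rstrip l) = PySem.Chars.rstrip l := by
  show (List.dropWhile _ (List.dropWhile _ l.reverse).reverse.reverse).reverse = _
  rw [List.reverse_reverse, List.dropWhile_idempotent]
  rfl

theorem pvStrip_idem (l : List Char) :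
    PySem.Chars.strip (PySem.Chars.strip l) = PySem.Chars.strip l := by
  show PySem.Chars.rstrip (PySem.Chars.lstrip (PySem.Chars.rstrip (PySem.Chars.lstrip l))) =
    PySem.Chars.rstrip (PySem.Chars.lstrip l)
  rw [pvLstrip_of_rstrip_lstrip, pvRstrip_idem]

-- cleaning (replace " " "" then strip) is idempotent
theorem pvClean_idem (s : String) :
    PySem.Str.strip (PySem.Str.replace (PySem.Str.strip (PySem.Str.replace s " " "")) " " "") =
      PySem.Str.strip (PySem.Str.replace s " " "") := by
  apply String.toList_inj.mp
  rw [PySem.Str.toList_strip, PySem.Str.toList_replace, PySem.Str.toList_strip,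
    PySem.Str.toList_replace]
  have h1 : (" " : String).toList = [' '] := rfl
  have h2 : ("" : String).toList = [] := rfl
  rw [h1, h2, pvReplace_space, pvReplace_space]
  have hfix : (PySem.Chars.strip ((s.toList).filter (fun c => c != ' '))).filter
      (fun c => c != ' ') = PySem.Chars.strip ((s.toList).filter (fun c => c != ' ')) := by
    apply List.filter_eq_self.mpr
    intro c hc
    have hcf : c ∈ List.filter (fun c => c != ' ') s.toList := pvMem_strip hc
    exact (List.mem_filter.mp hcf).2
  rw [hfix, pvStrip_idem]

-- list.remove with a preceding membership test
theorem pvRemove?_spec (xs : List String) (v : String) :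
    PySem.List.remove? xs v = if v ∈ xs then some (xs.erase v) else none := by
  induction xs with
  | nil => simp [PySem.List.remove?, List.idxOf?_nil]
  | cons x t ih =>
    by_cases hx : x = v
    · subst hx
      simp [PySem.List.remove?, List.idxOf?_cons, List.erase_cons_head]
    · have hb : (x == v) = false := by simp [hx]
      simp only [PySem.List.remove?] at ih ⊢
      simp only [List.idxOf?_cons, hb, Bool.false_eq_true, if_false, Option.map_map, List.mem_cons]
      rw [List.erase_cons_tail (by simp [hx])]
      by_cases hm : v ∈ t
      · simp only [hm, or_true, if_true]
        cases hi : List.idxOf? v t with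
        | none => rw [hi] at ih; simp [hm] at ih
        | some k =>
          rw [hi] at ih; simp only [hm, if_true, Option.map_some] at ih
          simp only [Option.map_some, Function.comp_apply, List.eraseIdx_cons_succ]
          rw [Option.some.injEq] at ih ⊢
          rw [ih]
      · have hvx : v ≠ x := Ne.symm hx
        simp only [hm, or_false, hvx, if_false]
        cases hi : List.idxOf? v t with
        | some k => rw [hi] at ih; simp [hm] at ih
        | none => simp

-- A's remove loop succeeds with an empty leftover exactly on permutations
theorem pvRemoveLoop_perm (g a : List String) :
    pvRemoveLoop g a = ([], false) ↔ a.Perm g := by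
  induction g generalizing a with
  | nil => simp [pvRemoveLoop, List.perm_nil, Prod.ext_iff]
  | cons t ts ih =>
    simp only [pvRemoveLoop]
    rw [pvRemove?_spec]
    by_cases hm : t ∈ a
    · rw [if_pos hm]
      simp only []
      rw [ih]
      constructor
      · intro h
        exact List.Perm.symm (List.cons_perm_iff_perm_erase.mpr ⟨hm, h.symm⟩)
      · intro h
        exact ((List.cons_perm_iff_perm_erase.mp h.symm).2).symm
    · rw [if_neg hm]
      simp only []
      constructor
      · intro h
        exact absurd (congrArg Prod.snd h) (by simp)
      · intro h
        exact absurd (h.symm.mem_iff.mp (List.mem_cons_self)) hm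

theorem pvStrSplitB_eq (s sep : String) : pvStrSplitB s sep = pvStrSplit s sep := rfl

-- A's per-side wrong flag is the negation of B's sorted comparison
theorem pvWrong_eq (a g : String) :
    (if !(pvRemoveLoop ((pvStrSplit g "+").map PySem.Str.strip)
            ((pvStrSplit a "+").map PySem.Str.strip)).2 &&
        ((pvRemoveLoop ((pvStrSplit g "+").map PySem.Str.strip)
            ((pvStrSplit a "+").map PySem.Str.strip)).1.length != 0) then true
     else (pvRemoveLoop ((pvStrSplit g "+").map PySem.Str.strip)
            ((pvStrSplit a "+").map PySem.Str.strip)).2) =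
      !(decide (pvSide a = pvSide g)) := by
  set al := (pvStrSplit a "+").map PySem.Str.strip with hal
  set gl := (pvStrSplit g "+").map PySem.Str.strip with hgl
  have hiff : pvRemoveLoop gl al = ([], false) ↔ (pvSide a = pvSide g) := by
    rw [pvRemoveLoop_perm]
    unfold pvSide
    rw [pvStrSplitB_eq, pvStrSplitB_eq, ← hal, ← hgl]
    exact (PySem.List.sorted_id_eq_sorted_id_iff_perm al gl).symm
  by_cases hp : pvSide a = pvSide g
  · have h0 : pvRemoveLoop gl al = ([], false) := hiff.mpr hp
    rw [h0]
    simp [hp]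
  · have hne : pvRemoveLoop gl al ≠ ([], false) := fun h => hp (hiff.mp h)
    rcases hres : pvRemoveLoop gl al with ⟨rem, w⟩
    rw [hres] at hne
    cases w with
    | true => simp [hp]
    | false =>
      have hrem : rem ≠ [] := fun h => hne (by simp [h])
      have hlen : (rem.length != 0) = true := by
        simpa [List.length_eq_zero_iff] using hrem
      simp [hlen, hp]

-- ===== VERDICT (by name: the statement is the Claim_ definition above) =====
theorem verify_chemistry_qa_spec : Claim_equal_verify_chemistry_qa := by
  intro answer ground_truth question _ _
  unfold Spec_verify_chemistry_qa verify_chemistry_qa verify_chemistry_qa_alt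
  simp only []
  by_cases hin : PySem.Str.isIn "->" (PySem.Str.strip (PySem.Str.replace ground_truth " " "")) = true
  · simp only [hin, if_true]
    by_cases hg : ((PySem.Str.count (PySem.Str.strip (PySem.Str.replace answer " " "")) "->" != 1) ||
        !(PySem.Str.isIn "->" (PySem.Str.strip (PySem.Str.replace answer " " "")))) = true
    · simp only [hg, if_true]
    · simp only [hg]
      rw [show pvStrSplitB (PySem.Str.strip (PySem.Str.replace answer " " "")) "->" = pvStrSplit (PySem.Str.strip (PySem.Str.replace answer " " "")) "->" from rfl,
        show pvStrSplitB (PySem.Str.strip (PySem.Str.replace ground_truth " " "")) "->" = pvStrSplit (PySem.Str.strip (PySem.Str.replace ground_truth " " "")) "->" from rfl]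
      rcases hA : pvStrSplit (PySem.Str.strip (PySem.Str.replace answer " " "")) "->" with _ | ⟨al, _ | ⟨ar, _ | _⟩⟩ <;>
        rcases hG : pvStrSplit (PySem.Str.strip (PySem.Str.replace ground_truth " " "")) "->" with _ | ⟨gl, _ | ⟨gr, _ | _⟩⟩ <;>
        simp only [pvUnpack2] <;>
        try rfl
      rw [pvWrong_eq al gl, pvWrong_eq ar gr]
      by_cases h1 : pvSide al = pvSide gl <;> by_cases h2 : pvSide ar = pvSide gr <;>
        simp [h1, h2]
  · simp only [Bool.not_eq_true] at hin
    simp only [hin, Bool.false_eq_true, if_false]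
    rw [pvClean_idem, pvClean_idem]
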